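-- pv_equiv track=rewrite | github.com/scott2000/answerset | test/test_util.py | visualize_range
-- ===== SOURCE A (Python) =====
-- def visualize_range(input: str, bracket_ranges: list[tuple[int, int]]) -> str:
--     starts = set(range[0] for range in bracket_ranges)
--     ends = set(range[1] - 1 for range in bracket_ranges)
--
--     def show(i: int) -> str:
--         if i in starts:
--             return '{'
--         elif i in ends:
--             return '}'
--         else:
--             return '-'
--
--     return ''.join(show(i) for i in range(len(input)))
-- ===== SOURCE B (Python) =====
-- def visualize_range(input: str, bracket_ranges: list[tuple[int, int]]) -> str:
--     n = len(input)
--     result = ['-'] * n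
--     for (s, e) in bracket_ranges:
--         if 0 <= e - 1 < n:
--             result[e - 1] = '}'
--     for (s, e) in bracket_ranges:
--         if 0 <= s < n:
--             result[s] = '{'
--     return ''.join(result)
-- ===== Notes on version B (the rewrite author's own statement) =====
-- stated objective: faster
-- what changed: Instead of building start/end sets and testing set membership at every character position, B scatters the markers directly into a '-'-filled buffer with two passes over the ranges (ends first, then starts, so starts win as in A's branch order); per-character work drops to a plain buffer join.
import Mathlib
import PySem

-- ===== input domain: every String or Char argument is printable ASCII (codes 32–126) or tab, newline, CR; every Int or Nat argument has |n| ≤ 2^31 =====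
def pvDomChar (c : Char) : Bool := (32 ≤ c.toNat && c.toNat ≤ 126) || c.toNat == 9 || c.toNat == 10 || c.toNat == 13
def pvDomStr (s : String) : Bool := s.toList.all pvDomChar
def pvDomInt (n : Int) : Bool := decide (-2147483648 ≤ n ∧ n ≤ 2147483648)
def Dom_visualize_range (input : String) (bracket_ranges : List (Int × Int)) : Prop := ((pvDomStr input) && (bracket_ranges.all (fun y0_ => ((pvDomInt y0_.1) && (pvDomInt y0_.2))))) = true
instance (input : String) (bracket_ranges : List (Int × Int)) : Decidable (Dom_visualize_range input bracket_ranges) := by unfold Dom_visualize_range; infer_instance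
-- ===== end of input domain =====

-- B replaces A's membership test per character position by scattering the markers
-- into a '-'-filled buffer with two passes over the ranges (ends first, then starts).

-- ===== PORT A =====
def visualize_range (input : String) (bracket_ranges : List (Int × Int)) : String :=
  let starts : PySem.Set Int := PySem.Set.ofList (bracket_ranges.map (fun range => range.1))
  let ends : PySem.Set Int := PySem.Set.ofList (bracket_ranges.map (fun range => range.2 - 1))
  let show_ : Int → String := fun i =>
    if PySem.Set.contains starts i then "{"
    else if PySem.Set.contains ends i then "}"
    else "-"
  PySem.Str.join "" ((PySem.List.pyRange 0 (PySem.Str.len input) 1).map show_)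

-- ===== PORT B =====
def visualize_range_alt (input : String) (bracket_ranges : List (Int × Int)) : String :=
  let n : Int := PySem.Str.len input
  let result0 : List Char := List.replicate n.toNat '-'
  let result1 : List Char := bracket_ranges.foldl
    (fun res r => if 0 ≤ r.2 - 1 ∧ r.2 - 1 < n then res.set (r.2 - 1).toNat '}' else res) result0
  let result2 : List Char := bracket_ranges.foldl
    (fun res r => if 0 ≤ r.1 ∧ r.1 < n then res.set r.1.toNat '{' else res) result1
  String.ofList result2

-- ===== PRECONDITION & SPEC =====
def Spec_visualize_range (input : String) (bracket_ranges : List (Int × Int)) (out : String) : Prop := out = visualize_range_alt input bracket_ranges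
instance (input : String) (bracket_ranges : List (Int × Int)) (out : String) : Decidable (Spec_visualize_range input bracket_ranges out) := by unfold Spec_visualize_range; infer_instance

-- ===== CLAIM (what is proved, stated in full; the proofs are below) =====
def Claim_equal_visualize_range : Prop := ∀ (input : String) (bracket_ranges : List (Int × Int)), Dom_visualize_range input bracket_ranges → Spec_visualize_range input bracket_ranges (visualize_range input bracket_ranges)

-- ===== LEMMAS AND PROOFS =====

-- The scatter fold preserves the buffer length.
theorem foldl_scatter_length {α : Type} (P : α → Prop) [DecidablePred P] (g : α → Nat) (c : Char) :
    ∀ (rs : List α) (buf : List Char),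
      (rs.foldl (fun b r => if P r then b.set (g r) c else b) buf).length = buf.length := by
  intro rs
  induction rs with
  | nil => intro buf; rfl
  | cons r rs ih =>
    intro buf
    simp only [List.foldl_cons]
    rw [ih]
    split <;> simp

-- What the scatter fold leaves at index k: c if some admitted element targets k, else the old entry.
theorem foldl_scatter_getElem? {α : Type} (P : α → Prop) [DecidablePred P] (g : α → Nat) (c : Char) :
    ∀ (rs : List α) (buf : List Char), (∀ r ∈ rs, P r → g r < buf.length) → ∀ (k : Nat),
      (rs.foldl (fun b r => if P r then b.set (g r) c else b) buf)[k]? =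
        if ∃ r ∈ rs, P r ∧ g r = k then some c else buf[k]? := by
  intro rs
  induction rs with
  | nil => intro buf _ k; simp
  | cons r rs ih =>
    intro buf hlt k
    simp only [List.foldl_cons]
    rw [ih]
    · by_cases hP : P r
      · simp only [hP, if_true]
        rw [List.getElem?_set]
        by_cases hk : ∃ r' ∈ rs, P r' ∧ g r' = k
        · simp [hk]
        · by_cases hg : g r = k
          · have hlen : g r < buf.length := hlt r (by simp) hP
            simp [hk, hg, hP, hg ▸ hlen]
          · simp [hk, hg, hP]
      · simp only [hP, if_false]
        by_cases hk : ∃ r' ∈ rs, P r' ∧ g r' = k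
        · simp [hk]
        · simp [hk, hP]
    · intro r' hr' hP'
      have h := hlt r' (List.mem_cons_of_mem _ hr') hP'
      split <;> simpa using h

-- The character A's show() returns at position i (proof-only abbreviation).
def showChar (brs : List (Int × Int)) (i : Int) : Char :=
  if (PySem.Set.ofList (brs.map (fun r => r.1))).contains i then '{'
  else if (PySem.Set.ofList (brs.map (fun r => r.2 - 1))).contains i then '}'
  else '-'

-- A's joined string, position by position.
theorem A_get (brs : List (Int × Int)) (m : Int) (n k : Nat) (hm : m = (n : Int)) :
    (PySem.Chars.join [] (List.map String.toList (List.map (fun i =>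
        if (PySem.Set.ofList (brs.map (fun r => r.1))).contains i then "{"
        else if (PySem.Set.ofList (brs.map (fun r => r.2 - 1))).contains i then "}"
        else "-") (PySem.List.pyRange 0 m 1))))[k]? =
      if k < n then some (showChar brs k) else none := by
  subst hm
  rw [List.map_map]
  have hshow : (String.toList ∘ fun i : Int =>
      if (PySem.Set.ofList (brs.map (fun r => r.1))).contains i then "{"
      else if (PySem.Set.ofList (brs.map (fun r => r.2 - 1))).contains i then "}"
      else "-") = fun i : Int => [showChar brs i] := by
    funext i
    simp only [Function.comp, showChar]
    split_ifs <;> decide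
  rw [hshow]
  rw [show (List.map (fun i : Int => [showChar brs i]) (PySem.List.pyRange 0 (n : Int) 1))
      = List.map (fun c => [c]) (List.map (showChar brs) (PySem.List.pyRange 0 (n : Int) 1)) from by
        rw [List.map_map]; rfl,
    PySem.Chars.join_nil_singletons]
  by_cases hk : k < n
  · rw [PySem.List.getElem?_map_pyRange_zero _ n k hk, if_pos hk]
  · rw [if_neg hk, List.getElem?_eq_none]
    rw [List.length_map, PySem.List.length_pyRange_one]; omega

-- B's buffer after both scatter passes, position by position.
theorem B_get (brs : List (Int × Int)) (m : Int) (n k : Nat) (hm : m = (n : Int)) :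
    (brs.foldl (fun res r => if 0 ≤ r.1 ∧ r.1 < m then res.set r.1.toNat '{' else res)
      (brs.foldl (fun res r => if 0 ≤ r.2 - 1 ∧ r.2 - 1 < m then res.set (r.2 - 1).toNat '}' else res)
        (List.replicate m.toNat '-')))[k]? =
      if k < n then some (showChar brs k) else none := by
  subst hm
  have hl0 : (List.replicate ((n : Int)).toNat '-').length = n := by simp
  have hl1 : (brs.foldl (fun res r => if 0 ≤ r.2 - 1 ∧ r.2 - 1 < (n : Int) then res.set (r.2 - 1).toNat '}' else res)
      (List.replicate ((n : Int)).toNat '-')).length = n := by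
    rw [foldl_scatter_length (fun r : Int × Int => 0 ≤ r.2 - 1 ∧ r.2 - 1 < (n : Int))
      (fun r => (r.2 - 1).toNat) '}']
    exact hl0
  have hc1 : ∀ r ∈ brs, (0 ≤ r.1 ∧ r.1 < (n : Int)) →
      (fun r : Int × Int => r.1.toNat) r <
        (brs.foldl (fun res r => if 0 ≤ r.2 - 1 ∧ r.2 - 1 < (n : Int) then res.set (r.2 - 1).toNat '}' else res)
          (List.replicate ((n : Int)).toNat '-')).length := by
    intro r _ hP; rw [hl1]; simp only []; omega
  have hc0 : ∀ r ∈ brs, (0 ≤ r.2 - 1 ∧ r.2 - 1 < (n : Int)) →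
      (fun r : Int × Int => (r.2 - 1).toNat) r < (List.replicate ((n : Int)).toNat '-').length := by
    intro r _ hP; rw [hl0]; simp only []; omega
  rw [foldl_scatter_getElem? (fun r : Int × Int => 0 ≤ r.1 ∧ r.1 < (n : Int)) (fun r => r.1.toNat) '{' brs _ hc1 k]
  rw [foldl_scatter_getElem? (fun r : Int × Int => 0 ≤ r.2 - 1 ∧ r.2 - 1 < (n : Int)) (fun r => (r.2 - 1).toNat) '}' brs _ hc0 k]
  by_cases hk : k < n
  · rw [if_pos hk]
    have hstart : (PySem.Set.ofList (brs.map (fun r => r.1))).contains ((k : Nat) : Int) = true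
        ↔ ∃ r ∈ brs, (0 ≤ r.1 ∧ r.1 < (n : Int)) ∧ r.1.toNat = k := by
      rw [PySem.Set.contains_iff, PySem.Set.mem_ofList, List.mem_map]
      constructor
      · rintro ⟨r, hr, heq⟩; exact ⟨r, hr, by omega, by omega⟩
      · rintro ⟨r, hr, _, h2⟩; exact ⟨r, hr, by omega⟩
    have hend : (PySem.Set.ofList (brs.map (fun r => r.2 - 1))).contains ((k : Nat) : Int) = true
        ↔ ∃ r ∈ brs, (0 ≤ r.2 - 1 ∧ r.2 - 1 < (n : Int)) ∧ (r.2 - 1).toNat = k := by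
      rw [PySem.Set.contains_iff, PySem.Set.mem_ofList, List.mem_map]
      constructor
      · rintro ⟨r, hr, heq⟩; exact ⟨r, hr, by omega, by omega⟩
      · rintro ⟨r, hr, _, h2⟩; exact ⟨r, hr, by omega⟩
    have hrep : (List.replicate ((n : Int)).toNat '-')[k]? = some '-' := by
      rw [List.getElem?_replicate]; simp; omega
    simp only [showChar]
    by_cases hS : ∃ r ∈ brs, (0 ≤ r.1 ∧ r.1 < (n : Int)) ∧ r.1.toNat = k
    · rw [if_pos hS, if_pos (hstart.mpr hS)]
    · rw [if_neg hS, if_neg (hstart.not.mpr hS)]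
      by_cases hE : ∃ r ∈ brs, (0 ≤ r.2 - 1 ∧ r.2 - 1 < (n : Int)) ∧ (r.2 - 1).toNat = k
      · rw [if_pos hE, if_pos (hend.mpr hE)]
      · rw [if_neg hE, if_neg (hend.not.mpr hE), hrep]
  · rw [if_neg hk]
    have hS : ¬ ∃ r ∈ brs, (0 ≤ r.1 ∧ r.1 < (n : Int)) ∧ r.1.toNat = k := by
      rintro ⟨r, _, ⟨h1, h2⟩, h3⟩; omega
    have hE : ¬ ∃ r ∈ brs, (0 ≤ r.2 - 1 ∧ r.2 - 1 < (n : Int)) ∧ (r.2 - 1).toNat = k := by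
      rintro ⟨r, _, ⟨h1, h2⟩, h3⟩; omega
    have hrep : (List.replicate ((n : Int)).toNat '-')[k]? = none := by
      rw [List.getElem?_eq_none]; simp; omega
    rw [if_neg hS, if_neg hE, hrep]

theorem visualize_range_spec : Claim_equal_visualize_range := by
  intro input brs _
  unfold Spec_visualize_range visualize_range visualize_range_alt
  apply String.toList_inj.mp
  rw [PySem.Str.toList_join, String.toList_ofList, String.toList_ofList]
  apply List.ext_getElem?
  intro k
  rw [A_get brs (PySem.Str.len input) input.toList.length k (PySem.Str.len_eq input),
    B_get brs (PySem.Str.len input) input.toList.length k (PySem.Str.len_eq input)]
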